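-- pv_equiv track=rewrite | github.com/nileshivam/caption-change-as-view-of-video-changes | co.py | breakWithThesHold
-- ===== SOURCE A (Python) =====
-- def breakWithThesHold(l,T):
--   if(T==0):
--     return l
--   index=(-1)
--   new_l=[]
--   while (index+1<len(l)):
--     if((not index==-1) and (prev+T<l[index+1])):
--         new_l.append(prev+T)
--         prev+=T
--     else:
--       index+=1
--       prev=l[index]
--       new_l.append(l[index])
--   return new_l
-- ===== SOURCE B (Python) =====
-- def breakWithThesHold(l, T):
--     if T == 0:
--         return l
--     def seg(a, b):
--         out = [a]
--         v = a + T
--         while v < b: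
--             out.append(v)
--             v += T
--         return out
--     return [x for p in zip(l, l[1:]) for x in seg(*p)] + l[-1:]
-- ===== Notes on version B (the rewrite author's own statement) =====
-- stated objective: simpler
-- what changed: Replaced the flag-driven single while loop with index/prev state by a flat comprehension over consecutive pairs zip(l,l[1:]), each pair expanded by a small local gap-filling helper, plus l[-1:] for the final element; Pre_ excludes only inputs (negative T with a pair l[i]+T < l[i+1]) where both programs loop forever.
import Mathlib
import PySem

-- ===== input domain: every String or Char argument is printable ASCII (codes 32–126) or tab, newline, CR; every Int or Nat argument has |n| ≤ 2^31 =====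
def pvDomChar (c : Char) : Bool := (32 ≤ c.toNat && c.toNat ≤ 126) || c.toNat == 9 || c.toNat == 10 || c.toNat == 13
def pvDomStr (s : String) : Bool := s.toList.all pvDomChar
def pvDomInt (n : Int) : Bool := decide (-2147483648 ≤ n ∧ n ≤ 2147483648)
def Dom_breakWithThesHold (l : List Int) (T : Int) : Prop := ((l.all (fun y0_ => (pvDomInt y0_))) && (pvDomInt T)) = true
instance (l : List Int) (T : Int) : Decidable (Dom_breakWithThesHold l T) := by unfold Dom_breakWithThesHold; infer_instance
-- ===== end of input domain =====

-- B replaces A's flag-driven single while loop by a flat expansion over consecutive pairs (simpler decomposition, same cost).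


-- ===== PORT A =====
-- A's while loop, ported with explicit fuel (`none` = fuel exhausted, i.e. the Python
-- loop would still be running).  Every l[index+1] access happens under the loop guard
-- index+1 < len(l) with index ≥ -1, so pyGetD's default is never used (exact port).
def pvLoopA (l : List Int) (T : Int) (fuel : Nat) (index prev : Int) (acc : List Int) : Option (List Int) :=
  if index + 1 < (l.length : Int) then
    match fuel with
    | 0 => none
    | f + 1 =>
      if index ≠ -1 ∧ prev + T < PySem.List.pyGetD l (index + 1) 0 then
        pvLoopA l T f index (prev + T) (acc ++ [prev + T])
      else
        pvLoopA l T f (index + 1) (PySem.List.pyGetD l (index + 1) 0)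
          (acc ++ [PySem.List.pyGetD l (index + 1) 0])
  else some acc

-- fuel bound: on every input Pre_ admits the loop makes at most this many iterations
def pvFuelA (l : List Int) : Nat :=
  l.length + (l.zip l.tail).foldl (fun s p => s + (p.2 - p.1).toNat) 0

def breakWithThesHold (l : List Int) (T : Int) : List Int :=
  if T = 0 then l else (pvLoopA l T (pvFuelA l) (-1) 0 []).getD []

-- ===== PORT B =====
-- the inner while loop of B's helper `seg`, fueled; (b-a).toNat steps suffice for
-- every T ≥ 1, and for T < 0 admitted by Pre_ the loop body never runs
def pvFill (v b T : Int) (fuel : Nat) : List Int :=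
  match fuel with
  | 0 => []
  | f + 1 => if v < b then v :: pvFill (v + T) b T f else []

def pvSeg (a b T : Int) : List Int := a :: pvFill (a + T) b T (b - a).toNat

def breakWithThesHold_alt (l : List Int) (T : Int) : List Int :=
  if T = 0 then l
  else ((l.zip l.tail).flatMap (fun p => pvSeg p.1 p.2 T)) ++ PySem.List.slice l (some (-1)) none

-- ===== PRECONDITION & SPEC =====
-- Pre_ excludes only inputs where A loops forever (negative T with some consecutive
-- pair l[i]+T < l[i+1]); A returns on every input Pre_ admits.
def Pre_breakWithThesHold (l : List Int) (T : Int) : Prop :=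
  0 ≤ T ∨ ∀ p ∈ l.zip l.tail, p.2 ≤ p.1 + T
instance (l : List Int) (T : Int) : Decidable (Pre_breakWithThesHold l T) := by
  unfold Pre_breakWithThesHold; infer_instance
def pvWitness_breakWithThesHold : List Int × Int := ([0, 5], 2)

def Spec_breakWithThesHold (l : List Int) (T : Int) (out : List Int) : Prop := out = breakWithThesHold_alt l T
instance (l : List Int) (T : Int) (out : List Int) : Decidable (Spec_breakWithThesHold l T out) := by unfold Spec_breakWithThesHold; infer_instance

-- ===== CLAIM (what is proved, stated in full; the proofs are below) =====
def Claim_equal_breakWithThesHold : Prop := ∀ (l : List Int) (T : Int), Dom_breakWithThesHold l T → Pre_breakWithThesHold l T → Spec_breakWithThesHold l T (breakWithThesHold l T)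

-- ===== LEMMAS AND PROOFS =====

-- everything A's loop still emits once it stands at index j with prev = l[j] already appended
def pvTail (T : Int) : List Int → List Int
  | a :: b :: r => pvFill (a + T) b T (b - a).toNat ++ b :: pvTail T (b :: r)
  | _ => []

-- exact fuel A's loop consumes from index j (one unit per emitted element) to the guard exit
def pvFneed (T : Int) : List Int → Nat
  | a :: b :: r => (pvFill (a + T) b T (b - a).toNat).length + 1 + pvFneed T (b :: r)
  | _ => 0

theorem pvFill_succ (v b T : Int) (f : Nat) :
    pvFill v b T (f + 1) = if v < b then v :: pvFill (v + T) b T f else [] := rfl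

theorem pvLoopA_stop (l : List Int) (T : Int) (fuel : Nat) (i p : Int) (acc : List Int)
    (h : ¬ (i + 1 < (l.length : Int))) : pvLoopA l T fuel i p acc = some acc := by
  cases fuel <;> (rw [pvLoopA.eq_def]; simp [h])

theorem pvLoopA_succ (l : List Int) (T : Int) (f : Nat) (i p : Int) (acc : List Int)
    (h : i + 1 < (l.length : Int)) :
    pvLoopA l T (f + 1) i p acc =
      if i ≠ -1 ∧ p + T < PySem.List.pyGetD l (i + 1) 0 then
        pvLoopA l T f i (p + T) (acc ++ [p + T])
      else
        pvLoopA l T f (i + 1) (PySem.List.pyGetD l (i + 1) 0)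
          (acc ++ [PySem.List.pyGetD l (i + 1) 0]) := by
  rw [pvLoopA.eq_def]; simp [h]

theorem pvFill_nil (v b T : Int) (h : ¬ v < b) : ∀ f, pvFill v b T f = [] := by
  intro f; cases f <;> simp [pvFill, h]

theorem pvFill_len_le (b T : Int) : ∀ (f : Nat) (v : Int), (pvFill v b T f).length ≤ f := by
  intro f
  induction f with
  | zero => intro v; simp [pvFill]
  | succ f ih =>
    intro v
    by_cases h : v < b
    · simpa [pvFill_succ, h] using Nat.succ_le_succ (ih (v + T))
    · simp [pvFill_succ, h]

theorem pvFill_stab (b T : Int) (hT : 1 ≤ T) :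
    ∀ (g : Nat) (v : Int), (b - v).toNat ≤ g → pvFill v b T (g + 1) = pvFill v b T g := by
  intro g
  induction g with
  | zero =>
    intro v hg
    have h : ¬ v < b := by omega
    rw [pvFill_succ, if_neg h]; rfl
  | succ g ih =>
    intro v hg
    by_cases h : v < b
    · rw [pvFill_succ v b T (g + 1), pvFill_succ v b T g, if_pos h, if_pos h,
        ih (v + T) (by omega)]
    · rw [pvFill_succ v b T (g + 1), pvFill_succ v b T g, if_neg h, if_neg h]

theorem pvStab_pair (a b T : Int) (hT : T ≠ 0) (hp : 0 ≤ T ∨ b ≤ a + T) :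
    pvFill (a + T) b T ((b - a).toNat + 1) = pvFill (a + T) b T (b - a).toNat := by
  rcases hp with hp | hp
  · exact pvFill_stab b T (by omega) _ _ (by omega)
  · rw [pvFill_nil _ _ _ (by omega), pvFill_nil _ _ _ (by omega)]

theorem pvZip_mem_of_drop (a b : Int) : ∀ (l : List Int) (j : Nat) (r : List Int),
    l.drop j = a :: b :: r → (a, b) ∈ l.zip l.tail := by
  intro l
  induction l with
  | nil => intro j r h; simp at h
  | cons x l' ih =>
    intro j r h
    cases j with
    | zero =>
      simp at h
      obtain ⟨h1, h2⟩ := h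
      subst h1; subst h2
      simp
    | succ j =>
      simp at h
      have hm := ih j r h
      cases l' with
      | nil => simp at h
      | cons y l'' => simpa using Or.inr hm

-- one segment of A's loop: fill the gap at index j, then advance to index j+1
theorem pvLoop_seg (l : List Int) (T : Int) (j : Nat) (b : Int)
    (hjb : PySem.List.pyGetD l ((j : Int) + 1) 0 = b)
    (hlt : (j : Int) + 1 < (l.length : Int)) :
    ∀ (g : Nat) (p : Int) (acc : List Int) (f : Nat),
      pvFill (p + T) b T (g + 1) = pvFill (p + T) b T g →
      pvLoopA l T ((pvFill (p + T) b T g).length + 1 + f) (j : Int) p acc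
        = pvLoopA l T f ((j : Int) + 1) b (acc ++ pvFill (p + T) b T g ++ [b]) := by
  intro g
  induction g with
  | zero =>
    intro p acc f hstab
    have hnl : ¬ p + T < b := by
      by_contra h
      rw [pvFill_succ, if_pos h] at hstab
      simp [pvFill] at hstab
    have hcond : ¬ ((j : Int) ≠ -1 ∧ p + T < PySem.List.pyGetD l ((j : Int) + 1) 0) := by
      rw [hjb]; tauto
    have hfuel : (pvFill (p + T) b T 0).length + 1 + f = f + 1 := by simp [pvFill]; omega
    rw [hfuel, pvLoopA_succ l T f _ p acc hlt, if_neg hcond, hjb]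
    simp [pvFill]
  | succ g ih =>
    intro p acc f hstab
    by_cases h : p + T < b
    · have h2 : pvFill (p + T) b T (g + 1) = (p + T) :: pvFill (p + T + T) b T g := by
        rw [pvFill_succ, if_pos h]
      have h1 : pvFill (p + T) b T (g + 1 + 1) = (p + T) :: pvFill (p + T + T) b T (g + 1) := by
        rw [pvFill_succ, if_pos h]
      have hstab' : pvFill (p + T + T) b T (g + 1) = pvFill (p + T + T) b T g := by
        rw [h1, h2] at hstab
        exact (List.cons.inj hstab).2
      have hcond : ((j : Int) ≠ -1 ∧ p + T < PySem.List.pyGetD l ((j : Int) + 1) 0) := by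
        rw [hjb]
        exact ⟨by omega, h⟩
      have hfuel : (pvFill (p + T) b T (g + 1)).length + 1 + f
          = ((pvFill ((p + T) + T) b T g).length + 1 + f) + 1 := by
        rw [h2]; simp [List.length_cons]; omega
      rw [hfuel, pvLoopA_succ l T _ _ p acc hlt, if_pos hcond]
      rw [ih (p + T) (acc ++ [p + T]) f hstab', h2]
      simp
    · have hz : pvFill (p + T) b T (g + 1) = [] := pvFill_nil _ _ _ h _
      have hcond : ¬ ((j : Int) ≠ -1 ∧ p + T < PySem.List.pyGetD l ((j : Int) + 1) 0) := by
        rw [hjb]; tauto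
      have hfuel : (pvFill (p + T) b T (g + 1)).length + 1 + f = f + 1 := by
        rw [hz]; simp; omega
      rw [hfuel, pvLoopA_succ l T f _ p acc hlt, if_neg hcond, hjb, hz]
      simp

-- running A's loop from index j with prev = l[j] already emitted
theorem pvLoop_chain (l : List Int) (T : Int) (hT : T ≠ 0) (hpre : Pre_breakWithThesHold l T) :
    ∀ (rest : List Int) (j : Nat) (a : Int) (acc : List Int) (f : Nat),
      l.drop j = a :: rest →
      pvLoopA l T (pvFneed T (a :: rest) + f) (j : Int) a acc = some (acc ++ pvTail T (a :: rest)) := by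
  intro rest
  induction rest with
  | nil =>
    intro j a acc f hdrop
    have hj : j < l.length := by
      by_contra hc
      rw [List.drop_eq_nil_of_le (by omega)] at hdrop
      simp at hdrop
    have hlen : l.length = j + 1 := by
      have h1 : (l.drop j).length = l.length - j := by simp
      rw [hdrop] at h1
      simp at h1; omega
    have hguard : ¬ ((j : Int) + 1 < (l.length : Int)) := by
      rw [hlen]; push_cast; omega
    rw [pvLoopA_stop l T _ _ a acc hguard]
    simp [pvTail]
  | cons b r ih =>
    intro j a acc f hdrop
    have hjlt : j + 2 ≤ l.length := by
      have h1 : (l.drop j).length = l.length - j := by simp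
      rw [hdrop] at h1; simp at h1; omega
    have hdrop1 : l.drop (j + 1) = b :: r := by
      rw [← List.tail_drop, hdrop]; rfl
    have hjb : PySem.List.pyGetD l ((j : Int) + 1) 0 = b := by
      have hcast : (j : Int) + 1 = ((j + 1 : Nat) : Int) := by omega
      rw [hcast, PySem.List.pyGetD_natCast]
      have hgd : l.getD (j + 1) 0 = (l.drop (j + 1)).getD 0 0 := by
        simp [List.getD, List.getElem?_drop]
      rw [hgd, hdrop1]; rfl
    have hlt : (j : Int) + 1 < (l.length : Int) := by push_cast; omega
    have hstab : pvFill (a + T) b T ((b - a).toNat + 1) = pvFill (a + T) b T (b - a).toNat := by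
      apply pvStab_pair a b T hT
      rcases hpre with h | h
      · left; exact h
      · right; exact h (a, b) (pvZip_mem_of_drop a b l j r hdrop)
    have hfuel : pvFneed T (a :: b :: r) + f
        = (pvFill (a + T) b T (b - a).toNat).length + 1 + (pvFneed T (b :: r) + f) := by
      simp [pvFneed]; omega
    rw [hfuel, pvLoop_seg l T j b hjb hlt (b - a).toNat a acc _ hstab]
    have hcast : (j : Int) + 1 = ((j + 1 : Nat) : Int) := by omega
    rw [hcast, ih (j + 1) b (acc ++ pvFill (a + T) b T (b - a).toNat ++ [b]) f hdrop1]
    simp [pvTail]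

theorem pvGap_foldl : ∀ (l l2 : List Int) (s0 : Nat),
    (l.zip l2).foldl (fun s p => s + (p.2 - p.1).toNat) s0
      = s0 + (l.zip l2).foldl (fun s p => s + (p.2 - p.1).toNat) 0 := by
  intro l
  induction l with
  | nil => simp
  | cons a l' ih =>
    intro l2 s0
    cases l2 with
    | nil => simp
    | cons b l2' =>
      simp only [List.zip_cons_cons, List.foldl_cons, Nat.zero_add]
      rw [ih l2' (s0 + (b - a).toNat), ih l2' ((b - a).toNat)]
      omega

theorem pvFneed_le (T : Int) : ∀ (a : Int) (l' : List Int),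
    pvFneed T (a :: l') + 1 ≤ pvFuelA (a :: l') := by
  intro a l'
  induction l' generalizing a with
  | nil => simp [pvFneed, pvFuelA]
  | cons b r ih =>
    have hlen := pvFill_len_le b T (b - a).toNat (a + T)
    have hIH := ih b
    unfold pvFuelA at hIH ⊢
    simp only [List.tail_cons, List.zip_cons_cons, List.foldl_cons, Nat.zero_add] at hIH ⊢
    rw [pvGap_foldl (b :: r) r ((b - a).toNat)]
    simp only [pvFneed]
    simp only [List.length_cons] at *
    omega

-- B's flatMap-over-pairs form equals head :: pvTail
theorem pvAlt_tail (T : Int) : ∀ (l' : List Int) (a : Int),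
    (((a :: l').zip ((a :: l').tail)).flatMap (fun p => pvSeg p.1 p.2 T))
      ++ (a :: l').drop ((a :: l').length - 1)
      = a :: pvTail T (a :: l') := by
  intro l'
  induction l' with
  | nil => intro a; simp [pvTail, pvSeg]
  | cons b r ih =>
    intro a
    have hd : (a :: b :: r).drop ((a :: b :: r).length - 1)
        = (b :: r).drop ((b :: r).length - 1) := by
      simp [List.drop_succ_cons]
    have ihb := ih b
    simp only [List.tail_cons] at ihb
    simp only [List.tail_cons, List.zip_cons_cons, List.flatMap_cons, hd]
    rw [List.append_assoc, ihb]
    simp [pvSeg, pvTail]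

-- ===== VERDICT (by name: the statement is the Claim_ definition above) =====
theorem breakWithThesHold_spec : Claim_equal_breakWithThesHold := by
  intro l T _hdom hpre
  unfold Spec_breakWithThesHold breakWithThesHold breakWithThesHold_alt
  by_cases hT : T = 0
  · simp [hT]
  · simp only [hT, if_false]
    cases l with
    | nil =>
      rw [pvLoopA_stop _ _ _ _ _ _ (by simp)]
      simp [PySem.List.slice_from_neg_one]
    | cons a l' =>
      obtain ⟨k, hk⟩ : ∃ k, pvFuelA (a :: l') = (pvFneed T (a :: l') + k) + 1 := by
        have := pvFneed_le T a l'
        exact ⟨pvFuelA (a :: l') - pvFneed T (a :: l') - 1, by omega⟩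
      have hguard : (-1 : Int) + 1 < (((a :: l').length : Nat) : Int) := by simp
      rw [hk, pvLoopA_succ _ _ _ _ _ _ hguard]
      have hcond : ¬ ((-1 : Int) ≠ -1 ∧ (0 : Int) + T < PySem.List.pyGetD (a :: l') (-1 + 1) 0) := by
        simp
      rw [if_neg hcond]
      have hget : PySem.List.pyGetD (a :: l') (-1 + 1) 0 = a := by
        norm_num [PySem.List.pyGetD_zero_cons]
      rw [hget]
      have hcast : (-1 : Int) + 1 = ((0 : Nat) : Int) := by norm_num
      rw [hcast, pvLoop_chain (a :: l') T hT hpre l' 0 a ([] ++ [a]) k (by simp)]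
      rw [PySem.List.slice_from_neg_one]
      simp [← pvAlt_tail T l' a]
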